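-- pv_equiv track=rewrite | github.com/AndreeSalazar/PyDead-BIB | Metal_Dead/integrations/metal_dead_benchmark.py | benchmark_cpu
-- ===== SOURCE A (Python) =====
-- def cpu_forward(token_id, vocab, layers):
--     h = token_id * 31 + 7
--     i = 0
--     while i < layers:
--         h = h * 17 + 13
--         h = h % 65536
--         i = i + 1
--     return h % vocab
--
-- def benchmark_cpu(iterations, vocab, layers):
--     total = 0
--     i = 0
--     while i < iterations:
--         r = cpu_forward(i, vocab, layers)
--         total = total + r
--         i = i + 1
--     return total
-- ===== SOURCE B (Python) =====
-- def benchmark_cpu(iterations, vocab, layers):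
--     M = 65536
--     # Compose the per-layer affine map h -> (17*h + 13) % M with itself
--     # `layers` times by exponentiation-by-squaring: O(log layers) once,
--     # then O(1) per token instead of O(layers).
--     a, b = 1, 0
--     if layers > 0:
--         aa, bb, n = 17, 13, layers
--         while n > 0:
--             if n % 2 == 1:
--                 a, b = (aa * a) % M, (aa * b + bb) % M
--             aa, bb = (aa * aa) % M, (aa * bb + bb) % M
--             n = n // 2
--     total = 0
--     for i in range(iterations):
--         h = i * 31 + 7
--         if layers > 0:
--             h = (a * h + b) % M
--         total = total + h % vocab
--     return total
-- ===== Notes on version B (the rewrite author's own statement) =====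
-- stated objective: faster
-- what changed: B precomputes the `layers`-fold composition of the affine map h -> (17h+13) mod 65536 once by exponentiation-by-squaring, then evaluates each token in O(1), instead of A's inner per-token loop over all layers.
import Mathlib
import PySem

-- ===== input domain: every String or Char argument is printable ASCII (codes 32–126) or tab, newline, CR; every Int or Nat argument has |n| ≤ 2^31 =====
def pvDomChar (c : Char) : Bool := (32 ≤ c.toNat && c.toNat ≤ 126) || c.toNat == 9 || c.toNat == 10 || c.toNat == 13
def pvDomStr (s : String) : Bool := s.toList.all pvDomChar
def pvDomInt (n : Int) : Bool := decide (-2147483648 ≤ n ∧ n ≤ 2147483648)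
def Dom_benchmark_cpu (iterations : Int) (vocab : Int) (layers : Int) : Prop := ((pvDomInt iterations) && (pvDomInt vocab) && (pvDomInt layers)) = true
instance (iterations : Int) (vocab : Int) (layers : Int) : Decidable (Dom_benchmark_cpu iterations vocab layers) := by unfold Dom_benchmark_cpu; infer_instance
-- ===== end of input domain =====

-- B replaces A's per-token loop over all layers by one exponentiation-by-squaring
-- of the composed affine map, then O(1) per token (measured asymptotically faster).


-- ===== PORT A =====
-- while i < layers: h = (h*17+13) % 65536
def cpuForwardLoop (layers : Int) (h : Int) (i : Int) : Int :=
  if i < layers then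
    cpuForwardLoop layers (PySem.Int.mod (h * 17 + 13) 65536) (i + 1)
  else h
termination_by (layers - i).toNat
decreasing_by omega

def cpu_forward (token_id : Int) (vocab : Int) (layers : Int) : Int :=
  PySem.Int.mod (cpuForwardLoop layers (token_id * 31 + 7) 0) vocab

def benchmarkLoopA (iterations : Int) (vocab : Int) (layers : Int) (total : Int) (i : Int) : Int :=
  if i < iterations then
    benchmarkLoopA iterations vocab layers (total + cpu_forward i vocab layers) (i + 1)
  else total
termination_by (iterations - i).toNat
decreasing_by omega

def benchmark_cpu (iterations : Int) (vocab : Int) (layers : Int) : Int :=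
  benchmarkLoopA iterations vocab layers 0 0

-- ===== PORT B =====
-- while n > 0: square-and-multiply on the affine pair (a, b) representing h ↦ (a*h+b) % 65536
def powLoop (a b aa bb n : Int) : Int × Int :=
  if n > 0 then
    if PySem.Int.mod n 2 = 1 then
      powLoop (PySem.Int.mod (aa * a) 65536) (PySem.Int.mod (aa * b + bb) 65536)
        (PySem.Int.mod (aa * aa) 65536) (PySem.Int.mod (aa * bb + bb) 65536)
        (PySem.Int.floordiv n 2)
    else
      powLoop a b (PySem.Int.mod (aa * aa) 65536) (PySem.Int.mod (aa * bb + bb) 65536)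
        (PySem.Int.floordiv n 2)
  else (a, b)
termination_by n.toNat
decreasing_by
  all_goals
    rw [PySem.Int.floordiv_eq_ediv_of_pos (by omega : (0:Int) < 2)]
    omega

def benchmarkLoopB (a b : Int) (iterations : Int) (vocab : Int) (layers : Int) (total : Int) (i : Int) : Int :=
  if i < iterations then
    benchmarkLoopB a b iterations vocab layers
      (total + PySem.Int.mod
        (if layers > 0 then PySem.Int.mod (a * (i * 31 + 7) + b) 65536 else i * 31 + 7) vocab)
      (i + 1)
  else total
termination_by (iterations - i).toNat
decreasing_by omega

def benchmark_cpu_alt (iterations : Int) (vocab : Int) (layers : Int) : Int :=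
  let p := if layers > 0 then powLoop 1 0 17 13 layers else (1, 0)
  benchmarkLoopB p.1 p.2 iterations vocab layers 0 0

-- ===== PRECONDITION & SPEC =====
-- A raises ZeroDivisionError when vocab = 0 and at least one token is processed; excluded.
def Pre_benchmark_cpu (iterations : Int) (vocab : Int) (layers : Int) : Prop :=
  iterations ≤ 0 ∨ vocab ≠ 0
instance (iterations : Int) (vocab : Int) (layers : Int) : Decidable (Pre_benchmark_cpu iterations vocab layers) := by unfold Pre_benchmark_cpu; infer_instance

def pvWitness_benchmark_cpu : Int × Int × Int := (5, 97, 3)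

def Spec_benchmark_cpu (iterations : Int) (vocab : Int) (layers : Int) (out : Int) : Prop := out = benchmark_cpu_alt iterations vocab layers
instance (iterations : Int) (vocab : Int) (layers : Int) (out : Int) : Decidable (Spec_benchmark_cpu iterations vocab layers out) := by unfold Spec_benchmark_cpu; infer_instance

-- ===== CLAIM (what is proved, stated in full; the proofs are below) =====
def Claim_equal_benchmark_cpu : Prop := ∀ (iterations : Int) (vocab : Int) (layers : Int), Dom_benchmark_cpu iterations vocab layers → Pre_benchmark_cpu iterations vocab layers → Spec_benchmark_cpu iterations vocab layers (benchmark_cpu iterations vocab layers)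

-- ===== LEMMAS AND PROOFS =====

-- the per-layer step, and evaluation of an affine pair, both reduced mod 65536
def pvStep (h : Int) : Int := (h * 17 + 13) % 65536
def pvEval (p : Int × Int) (h : Int) : Int := (p.1 * h + p.2) % 65536

theorem pymod_pos (a : Int) : PySem.Int.mod a 65536 = a % 65536 :=
  PySem.Int.mod_eq_emod_of_pos (by norm_num)

theorem pvStep_emod (h : Int) : pvStep (h % 65536) = pvStep h := by
  unfold pvStep
  conv_lhs => rw [Int.add_emod, Int.mul_emod, Int.emod_emod_of_dvd _ dvd_rfl,
    ← Int.mul_emod, ← Int.add_emod]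

theorem pvEval_mul (p1 p2 q1 q2 h : Int) :
    pvEval ((p1 * q1) % 65536, (p1 * q2 + p2) % 65536) h = pvEval (p1, p2) (pvEval (q1, q2) h) := by
  unfold pvEval
  have hm : ∀ x : Int, x % 65536 % 65536 = x % 65536 := fun x => Int.emod_emod_of_dvd x dvd_rfl
  have h1 : Int.ModEq 65536 (p1 * q1 % 65536 * h + (p1 * q2 + p2) % 65536)
      (p1 * q1 * h + (p1 * q2 + p2)) :=
    Int.ModEq.add (Int.ModEq.mul_right h (hm _)) (hm _)
  have h2 : Int.ModEq 65536 (p1 * ((q1 * h + q2) % 65536) + p2)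
      (p1 * (q1 * h + q2) + p2) :=
    Int.ModEq.add_right _ (Int.ModEq.mul_left _ (hm _))
  have key : p1 * q1 * h + (p1 * q2 + p2) = p1 * (q1 * h + q2) + p2 := by ring
  exact h1.trans (key ▸ h2.symm)

-- A's inner loop is pvStep iterated (layers - i).toNat times
theorem cpuForwardLoop_iter (layers i h : Int) :
    cpuForwardLoop layers h i = pvStep^[(layers - i).toNat] h := by
  rw [cpuForwardLoop]
  split
  · have hn : (layers - i).toNat = (layers - (i + 1)).toNat + 1 := by omega
    rw [cpuForwardLoop_iter layers (i + 1), hn, Function.iterate_succ_apply]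
    congr 1
    simp [pvStep]
  · have hn : (layers - i).toNat = 0 := by omega
    simp [hn]
termination_by (layers - i).toNat
decreasing_by omega

theorem pvEval_step (x : Int) : pvEval (17, 13) x = pvStep x := by
  unfold pvEval pvStep; ring_nf

-- powLoop invariant, stated through pvEval
theorem powLoop_eval (a b aa bb n : Int) (hn : 0 ≤ n) (h : Int) :
    pvEval (powLoop a b aa bb n) h = (pvEval (aa, bb))^[n.toNat] (pvEval (a, b) h) := by
  rw [powLoop]
  split
  · rename_i hpos
    have hdiv : PySem.Int.floordiv n 2 = n / 2 := PySem.Int.floordiv_eq_ediv_of_pos (by omega)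
    have hmod : PySem.Int.mod n 2 = n % 2 := PySem.Int.mod_eq_emod_of_pos (by omega)
    have h2 : 0 ≤ PySem.Int.floordiv n 2 := by rw [hdiv]; omega
    have hiter : ∀ k x, (pvEval ((aa * aa) % 65536, (aa * bb + bb) % 65536))^[k] x
        = (pvEval (aa, bb))^[2 * k] x := by
      intro k
      induction k with
      | zero => simp
      | succ m ih =>
        intro x
        rw [Function.iterate_succ_apply, ih, pvEval_mul aa bb aa bb x]
        have h2m : 2 * (m + 1) = (2 * m) + 1 + 1 := by ring
        rw [h2m, Function.iterate_succ_apply, Function.iterate_succ_apply]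
    rcases Int.emod_two_eq n with he | he
    · rw [if_neg (by rw [hmod, he]; norm_num)]
      rw [powLoop_eval _ _ _ _ _ h2, hdiv]
      simp only [pymod_pos]
      rw [hiter]
      congr 1
      omega
    · rw [if_pos (by rw [hmod, he])]
      rw [powLoop_eval _ _ _ _ _ h2, hdiv]
      simp only [pymod_pos]
      rw [hiter, pvEval_mul aa bb a b h]
      rw [show n.toNat = 2 * (n / 2).toNat + 1 by omega, Function.iterate_succ_apply]
  · have : n.toNat = 0 := by omega
    simp [this]
termination_by n.toNat
decreasing_by
  all_goals
    rw [PySem.Int.floordiv_eq_ediv_of_pos (by omega : (0:Int) < 2)]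
    omega

theorem step_iter_emod (k : Nat) (h : Int) (hk : 0 < k) :
    pvStep^[k] h = pvStep^[k] (h % 65536) := by
  obtain ⟨m, rfl⟩ : ∃ m, k = m + 1 := ⟨k - 1, by omega⟩
  rw [Function.iterate_succ_apply, Function.iterate_succ_apply, pvStep_emod]

-- per-token agreement: A's cpu_forward equals B's per-token expression
theorem forward_eq (i vocab layers : Int) :
    cpu_forward i vocab layers =
      PySem.Int.mod
        (if layers > 0 then
           PySem.Int.mod ((powLoop 1 0 17 13 layers).1 * (i * 31 + 7) + (powLoop 1 0 17 13 layers).2) 65536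
         else i * 31 + 7) vocab := by
  unfold cpu_forward
  by_cases hl : layers > 0
  · simp only [if_pos hl]
    congr 1
    rw [cpuForwardLoop_iter, pymod_pos]
    have h0 : (layers - 0).toNat = layers.toNat := by omega
    rw [h0]
    have hB : ((powLoop 1 0 17 13 layers).1 * (i * 31 + 7) + (powLoop 1 0 17 13 layers).2) % 65536
        = pvEval (powLoop 1 0 17 13 layers) (i * 31 + 7) := rfl
    rw [hB, powLoop_eval 1 0 17 13 layers (by omega)]
    have he : pvEval (1, 0) (i * 31 + 7) = (i * 31 + 7) % 65536 := by
      simp [pvEval]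
    rw [he, funext pvEval_step]
    exact step_iter_emod layers.toNat _ (by omega)
  · simp only [if_neg hl]
    congr 1
    rw [cpuForwardLoop]
    rw [if_neg (by omega)]

-- the two sum loops agree for every state
theorem loops_eq (iterations vocab layers total i : Int) :
    benchmarkLoopA iterations vocab layers total i =
      benchmarkLoopB (if layers > 0 then powLoop 1 0 17 13 layers else (1, 0)).1
        (if layers > 0 then powLoop 1 0 17 13 layers else (1, 0)).2
        iterations vocab layers total i := by
  rw [benchmarkLoopA, benchmarkLoopB]
  split
  · rw [loops_eq]
    congr 2
    rw [forward_eq]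
    by_cases hl : layers > 0 <;> simp [hl]
  · rfl
termination_by (iterations - i).toNat
decreasing_by omega

-- ===== VERDICT (by name: the statement is the Claim_ definition above) =====
theorem benchmark_cpu_spec : Claim_equal_benchmark_cpu := by
  intro iterations vocab layers _ _
  unfold Spec_benchmark_cpu benchmark_cpu benchmark_cpu_alt
  exact loops_eq iterations vocab layers 0 0
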